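-- pv_equiv track=rewrite | github.com/jarek-bir/XSS-VibesV2 | tools/advanced_obfuscator.py | overlong_utf8_encode
-- ===== SOURCE A (Python) =====
-- def overlong_utf8_encode(payload: str) -> str:
--     """Creates overlong UTF-8 encoding"""
--     result = ""
--     for char in payload:
--         if char == "<":
--             result += "%c0%3c"
--         elif char == ">":
--             result += "%c0%3e"
--         elif char == "/":
--             result += "%c0%2f"
--         else:
--             result += char
--     return result
-- ===== SOURCE B (Python) =====
-- def overlong_utf8_encode(payload: str) -> str:
--     """Creates overlong UTF-8 encoding"""
--     return (payload.replace("<", "%c0%3c")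
--                    .replace(">", "%c0%3e")
--                    .replace("/", "%c0%2f"))
-- ===== Notes on version B (the rewrite author's own statement) =====
-- stated objective: idiomatic
-- what changed: Replaced the explicit char-by-char branching loop with a chain of three str.replace scans (C-level, no per-char Python branching); safe because no replacement string contains a later target character.
import Mathlib
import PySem

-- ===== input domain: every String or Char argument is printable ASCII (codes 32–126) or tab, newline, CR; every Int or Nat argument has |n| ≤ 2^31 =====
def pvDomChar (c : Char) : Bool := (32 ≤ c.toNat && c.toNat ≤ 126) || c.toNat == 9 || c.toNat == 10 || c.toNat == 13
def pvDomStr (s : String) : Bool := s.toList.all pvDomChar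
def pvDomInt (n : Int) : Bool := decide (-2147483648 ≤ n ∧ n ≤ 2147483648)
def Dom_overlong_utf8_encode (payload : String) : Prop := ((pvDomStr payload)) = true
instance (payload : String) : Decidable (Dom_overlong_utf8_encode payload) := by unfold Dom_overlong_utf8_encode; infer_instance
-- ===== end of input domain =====

-- B replaces A's explicit char-by-char branching loop with three chained str.replace scans (idiomatic).

-- ===== PORT A =====
-- A: one pass over the characters, appending the escape (or the char) to the accumulator.
def overlong_utf8_encode (payload : String) : String :=
  String.ofList (payload.toList.foldl (fun result c =>
    if c = '<' then result ++ "%c0%3c".toList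
    else if c = '>' then result ++ "%c0%3e".toList
    else if c = '/' then result ++ "%c0%2f".toList
    else result ++ [c]) [])

-- ===== PORT B =====
def overlong_utf8_encode_alt (payload : String) : String :=
  PySem.Str.replace (PySem.Str.replace (PySem.Str.replace payload "<" "%c0%3c") ">" "%c0%3e") "/" "%c0%2f"

-- ===== PRECONDITION & SPEC =====
def Spec_overlong_utf8_encode (payload : String) (out : String) : Prop := out = overlong_utf8_encode_alt payload
instance (payload : String) (out : String) : Decidable (Spec_overlong_utf8_encode payload out) := by unfold Spec_overlong_utf8_encode; infer_instance

-- ===== CLAIM (what is proved, stated in full; the proofs are below) =====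
def Claim_equal_overlong_utf8_encode : Prop := ∀ (payload : String), Dom_overlong_utf8_encode payload → Spec_overlong_utf8_encode payload (overlong_utf8_encode payload)

-- ===== LEMMAS AND PROOFS =====

-- single-character replacement is a per-character flatMap
theorem replace_go_single (o : Char) (new : List Char) :
    ∀ (fuel : Nat) (l acc : List Char), l.length ≤ fuel →
      PySem.Chars.replace.go [o] new fuel l acc
        = acc.reverse ++ l.flatMap (fun c => if c = o then new else [c]) := by
  intro fuel
  induction fuel with
  | zero =>
    intro l acc h
    have : l = [] := List.eq_nil_of_length_eq_zero (Nat.le_zero.mp h)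
    subst this
    simp [PySem.Chars.replace.go]
  | succ n ih =>
    intro l acc h
    cases l with
    | nil => simp [PySem.Chars.replace.go]
    | cons c t =>
      by_cases hc : c = o
      · subst hc
        have hpre : List.isPrefixOf [c] (c :: t) = true := by
          simp [List.isPrefixOf]
        simp only [PySem.Chars.replace.go, hpre, if_pos]
        rw [show List.drop (List.length [c]) (c :: t) = t by simp]
        rw [ih t (new.reverse ++ acc) (by simpa using Nat.succ_le_succ_iff.mp h)]
        simp
      · have hpre : List.isPrefixOf [o] (c :: t) = false := by
          simp [List.isPrefixOf]
          exact fun he => absurd he.symm hc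
        simp only [PySem.Chars.replace.go, hpre]
        rw [if_neg (by simp)]
        rw [ih t (c :: acc) (by simpa using Nat.succ_le_succ_iff.mp h)]
        simp [hc]

theorem replace_single (o : Char) (new cs : List Char) :
    PySem.Chars.replace cs [o] new = cs.flatMap (fun c => if c = o then new else [c]) := by
  simp only [PySem.Chars.replace, List.isEmpty]
  rw [if_neg (by simp)]
  exact replace_go_single o new cs.length cs [] (Nat.le_refl _)

theorem overlong_utf8_encode_eq_alt (payload : String) :
    overlong_utf8_encode payload = overlong_utf8_encode_alt payload := by
  unfold overlong_utf8_encode overlong_utf8_encode_alt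
  simp only [PySem.Str.replace]
  refine congrArg String.ofList ?_
  simp only [String.toList_ofList]
  rw [show ("<" : String).toList = ['<'] by decide, show (">" : String).toList = ['>'] by decide, show ("/" : String).toList = ['/'] by decide]
  rw [replace_single, replace_single, replace_single]
  have hfun : (fun (result : List Char) c =>
      if c = '<' then result ++ "%c0%3c".toList
      else if c = '>' then result ++ "%c0%3e".toList
      else if c = '/' then result ++ "%c0%2f".toList
      else result ++ [c])
      = (fun (result : List Char) c => result ++
          (if c = '<' then "%c0%3c".toList
           else if c = '>' then "%c0%3e".toList
           else if c = '/' then "%c0%2f".toList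
           else [c])) := by
    funext r c
    split_ifs <;> rfl
  rw [hfun, PySem.List.foldl_append_eq_flatMap]
  rw [List.flatMap_assoc, List.flatMap_assoc]
  simp only [List.nil_append]
  apply List.flatMap_congr
  intro c _
  by_cases h1 : c = '<'
  · subst h1; decide
  by_cases h2 : c = '>'
  · subst h2; decide
  by_cases h3 : c = '/'
  · subst h3; decide
  simp [h1, h2, h3]

-- ===== VERDICT (by name: the statement is the Claim_ definition above) =====
theorem overlong_utf8_encode_spec : Claim_equal_overlong_utf8_encode := by
  intro payload _
  unfold Spec_overlong_utf8_encode
  rw [overlong_utf8_encode_eq_alt]
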